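-- pv_equiv track=rewrite | github.com/282207134/Pythonlianxi | 最接近target的值.py | closestTargetValue
-- ===== SOURCE A (Python) =====
-- def closestTargetValue(target, array):
--     n = len(array)
--     if n < 2:
--         return -1
--     array.sort()
--     diff = 0x7fffffff
--     left = 0
--     right = n - 1
--     while left < right:
--         if array[left] + array[right] > target:
--             right -= 1
--         else:
--             diff = min(diff, target - array[left] - array[right])
--             left += 1
--     if diff == 0x7fffffff:
--         return -1
--     else:
--         return target - diff
-- ===== SOURCE B (Python) =====
-- def closestTargetValue(target, array):
--     array.sort()
--     best = None
--     xs = array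
--     while len(xs) >= 2:
--         x, xs = xs[0], xs[1:]
--         for y in xs:
--             s = x + y
--             if s <= target and (best is None or s > best):
--                 best = s
--     return best if best is not None else -1
-- ===== Notes on version B (the rewrite author's own statement) =====
-- stated objective: simpler
-- what changed: A's two-pointer scan over the sorted array is replaced by a plain running maximum over all pairs (iterating suffixes of the sorted array), returning the best pair sum directly instead of tracking a diff against a 0x7fffffff sentinel.
-- intended difference: On inputs whose largest pair sum m <= target satisfies m <= target - 0x7fffffff (and m != -1), A's sentinel diff = 0x7fffffff is never beaten so A returns -1 despite the valid pair, while B returns m, the intended answer. — e.g. on closestTargetValue(0, [-1073741824, -1073741823]): A returns -1, B returns -2147483647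
import Mathlib
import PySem

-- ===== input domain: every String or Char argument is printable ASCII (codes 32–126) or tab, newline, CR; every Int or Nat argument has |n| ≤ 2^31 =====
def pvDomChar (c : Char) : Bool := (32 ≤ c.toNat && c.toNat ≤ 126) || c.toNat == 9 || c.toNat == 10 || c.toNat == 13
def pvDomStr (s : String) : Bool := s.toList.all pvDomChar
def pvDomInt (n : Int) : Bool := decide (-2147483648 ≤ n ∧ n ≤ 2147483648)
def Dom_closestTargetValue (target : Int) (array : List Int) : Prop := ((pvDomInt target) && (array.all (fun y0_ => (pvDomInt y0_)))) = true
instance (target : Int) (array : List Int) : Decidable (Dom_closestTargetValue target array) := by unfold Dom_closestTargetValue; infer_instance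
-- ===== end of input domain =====

-- B replaces A's two-pointer scan by a plain max-over-all-pairs suffix scan (simpler, not faster);
-- both Pythons sort `array` in place (same observable mutation); equivalence proved about the return value.

-- ===== PORT A =====
-- the two-pointer while-loop of A, state (diff, left, right)
def pvALoop (target : Int) (s : List Int) (diff left right : Int) : Int :=
  if _h : left < right then
    if PySem.List.pyGetD s left 0 + PySem.List.pyGetD s right 0 > target then
      pvALoop target s diff left (right - 1)
    else
      pvALoop target s (min diff (target - PySem.List.pyGetD s left 0 - PySem.List.pyGetD s right 0)) (left + 1) right
  else diff
termination_by (right - left).toNat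
decreasing_by all_goals omega

def closestTargetValue (target : Int) (array : List Int) : Int :=
  let n : Int := array.length
  if n < 2 then -1
  else
    let s := PySem.List.sorted array (fun x => x) false
    let diff := pvALoop target s 2147483647 0 (n - 1)
    if diff = 2147483647 then -1 else target - diff

-- ===== PORT B =====
-- inner `for y in xs` body of Source B
def pvBStep (target x : Int) (b : Option Int) (y : Int) : Option Int :=
  let s := x + y
  if s ≤ target then
    match b with
    | none => some s
    | some m => if m < s then some s else some m
  else b

-- the `while len(xs) >= 2` loop of Source B
def pvBLoop (target : Int) (best : Option Int) : List Int → Option Int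
  | [] => best
  | [_] => best
  | x :: xs => pvBLoop target (xs.foldl (pvBStep target x) best) xs

def closestTargetValue_alt (target : Int) (array : List Int) : Int :=
  let s := PySem.List.sorted array (fun x => x) false
  match pvBLoop target none s with
  | some m => m
  | none => -1

-- ===== PRECONDITION & SPEC =====
-- all pair sums of the input (i-th element with each later element), used only to state D_
def pvPairSums : List Int → List Int
  | [] => []
  | x :: xs => xs.map (fun y => x + y) ++ pvPairSums xs

-- On inputs whose largest pair sum m ≤ target is at most target - 0x7fffffff (and m ≠ -1), A's
-- sentinel diff = 0x7fffffff is never beaten, so A returns -1 although a valid pair exists,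
-- while B returns that largest pair sum m, the intended answer.
def D_closestTargetValue (target : Int) (array : List Int) : Prop :=
  ∃ m ∈ pvPairSums array, m ≤ target - 2147483647 ∧ m ≠ -1 ∧
    ∀ s ∈ pvPairSums array, s ≤ target → s ≤ m
instance (target : Int) (array : List Int) : Decidable (D_closestTargetValue target array) := by
  unfold D_closestTargetValue; infer_instance

def Spec_closestTargetValue (target : Int) (array : List Int) (out : Int) : Prop :=
  ¬ D_closestTargetValue target array → out = closestTargetValue_alt target array
instance (target : Int) (array : List Int) (out : Int) : Decidable (Spec_closestTargetValue target array out) := by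
  unfold Spec_closestTargetValue; infer_instance

def pvDiffWitness_closestTargetValue : Int × List Int := (0, [-1073741824, -1073741823])
def pvDiffWitnessOut_closestTargetValue : Int × Int := (-1, -2147483647)

-- ===== CLAIM (what is proved, stated in full; the proofs are below) =====
def Claim_unchanged_closestTargetValue : Prop := ∀ (target : Int) (array : List Int), Dom_closestTargetValue target array → Spec_closestTargetValue target array (closestTargetValue target array)
def Claim_changed_closestTargetValue : Prop := Dom_closestTargetValue (pvDiffWitness_closestTargetValue.1) (pvDiffWitness_closestTargetValue.2) ∧ D_closestTargetValue (pvDiffWitness_closestTargetValue.1) (pvDiffWitness_closestTargetValue.2) ∧ closestTargetValue (pvDiffWitness_closestTargetValue.1) (pvDiffWitness_closestTargetValue.2) = pvDiffWitnessOut_closestTargetValue.1 ∧ closestTargetValue_alt (pvDiffWitness_closestTargetValue.1) (pvDiffWitness_closestTargetValue.2) = pvDiffWitnessOut_closestTargetValue.2 ∧ pvDiffWitnessOut_closestTargetValue.1 ≠ pvDiffWitnessOut_closestTargetValue.2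
def Claim_exact_closestTargetValue : Prop := ∀ (target : Int) (array : List Int), Dom_closestTargetValue target array → D_closestTargetValue target array → closestTargetValue target array ≠ closestTargetValue_alt target array

-- ===== LEMMAS AND PROOFS =====

-- running maximum as an Option
def pvOmax (b : Option Int) (y : Int) : Option Int :=
  some (match b with | none => y | some m => max m y)

def pvLMax (xs : List Int) : Option Int := xs.foldl pvOmax none

theorem pvBStep_eq (t x : Int) (b : Option Int) (y : Int) :
    pvBStep t x b y = if x + y ≤ t then pvOmax b (x + y) else b := by
  unfold pvBStep pvOmax
  cases b with
  | none => simp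
  | some m =>
    by_cases h1 : x + y ≤ t <;> by_cases h2 : m < x + y <;> simp [h1, h2] <;> omega

theorem pvFoldl_max_comm (xs : List Int) : ∀ (m x : Int),
    xs.foldl max (max m x) = max m (xs.foldl max x) := by
  induction xs with
  | nil => intro m x; rfl
  | cons y xs ih =>
    intro m x
    simp only [List.foldl_cons, max_assoc]
    exact ih m (max x y)

theorem pvFoldl_omax_some (xs : List Int) : ∀ a : Int,
    xs.foldl pvOmax (some a) = some (xs.foldl max a) := by
  induction xs with
  | nil => intro a; rfl
  | cons x xs ih => intro a; simpa [pvOmax] using ih (max a x)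

theorem pvLMax_cons (x : Int) (xs : List Int) : pvLMax (x :: xs) = some (xs.foldl max x) := by
  simpa [pvLMax, pvOmax] using pvFoldl_omax_some xs x

theorem pvFold_omax (xs : List Int) : ∀ b : Option Int,
    xs.foldl pvOmax b = match pvLMax xs with | none => b | some m => pvOmax b m := by
  cases xs with
  | nil => intro b; simp [pvLMax]
  | cons x xs =>
    intro b
    rw [pvLMax_cons]
    cases b with
    | none => simpa [pvOmax] using pvFoldl_omax_some xs x
    | some m =>
      simp only [List.foldl_cons, pvOmax]
      rw [pvFoldl_omax_some, pvFoldl_max_comm]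

theorem pvLMax_none_iff (xs : List Int) : pvLMax xs = none ↔ xs = [] := by
  cases xs with
  | nil => simp [pvLMax]
  | cons x xs => simp [pvLMax_cons]

theorem pvLMax_eq_some_iff (xs : List Int) (m : Int) :
    pvLMax xs = some m ↔ m ∈ xs ∧ ∀ y ∈ xs, y ≤ m := by
  cases xs with
  | nil => simp [pvLMax]
  | cons x xs =>
    rw [pvLMax_cons]
    constructor
    · rintro h
      have hm : xs.foldl max x = m := by simpa using h
      subst hm
      refine ⟨?_, ?_⟩
      · rcases PySem.List.foldl_max_mem xs x with h | h
        · rw [h]; exact List.mem_cons_self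
        · exact List.mem_cons_of_mem _ h
      · intro y hy
        rcases List.mem_cons.mp hy with rfl | hy
        · exact (PySem.List.le_foldl_max xs y).1
        · exact (PySem.List.le_foldl_max xs x).2 y hy
    · rintro ⟨hmem, hub⟩
      have h1 : xs.foldl max x ≤ m := by
        rcases PySem.List.foldl_max_mem xs x with h | h
        · rw [h]; exact hub x List.mem_cons_self
        · exact hub _ (List.mem_cons_of_mem _ h)
      have h2 : m ≤ xs.foldl max x := by
        rcases List.mem_cons.mp hmem with rfl | hm
        · exact (PySem.List.le_foldl_max xs m).1
        · exact (PySem.List.le_foldl_max xs x).2 m hm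
      exact congrArg some (le_antisymm h1 h2)

theorem pvLMax_congr (xs ys : List Int) (h : ∀ s, s ∈ xs ↔ s ∈ ys) :
    pvLMax xs = pvLMax ys := by
  cases hx : pvLMax xs with
  | none =>
    rw [pvLMax_none_iff] at hx
    subst hx
    rcases hy : pvLMax ys with _ | m
    · rfl
    · rcases (pvLMax_eq_some_iff ys m).mp hy with ⟨hm, -⟩
      exact absurd ((h m).mpr hm) (List.not_mem_nil)
  | some m =>
    rcases (pvLMax_eq_some_iff xs m).mp hx with ⟨hm, hub⟩
    exact ((pvLMax_eq_some_iff ys m).mpr ⟨(h m).mp hm, fun y hy => hub y ((h y).mpr hy)⟩).symm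

-- B's inner fold is a running max over the admissible sums with x
theorem pvBInner_eq (t x : Int) (ys : List Int) : ∀ b : Option Int,
    ys.foldl (pvBStep t x) b = ((ys.map (fun y => x + y)).filter (fun s => decide (s ≤ t))).foldl pvOmax b := by
  induction ys with
  | nil => intro b; rfl
  | cons y ys ih =>
    intro b
    simp only [List.foldl_cons, List.map_cons, List.filter_cons]
    by_cases h : x + y ≤ t
    · simp only [h, decide_true, if_true, List.foldl_cons]
      rw [ih, pvBStep_eq, if_pos h]
    · simp only [h, decide_false, Bool.false_eq_true, if_false]
      rw [ih, pvBStep_eq, if_neg h]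

-- B's loop is the running max over all admissible pair sums
theorem pvBLoop_eq (t : Int) (xs : List Int) : ∀ b : Option Int,
    pvBLoop t b xs = ((pvPairSums xs).filter (fun s => decide (s ≤ t))).foldl pvOmax b := by
  induction xs with
  | nil => intro b; rfl
  | cons x xs ih =>
    intro b
    cases xs with
    | nil => rfl
    | cons y ys =>
      show pvBLoop t ((y :: ys).foldl (pvBStep t x) b) (y :: ys) = _
      rw [ih, pvBInner_eq]
      simp only [pvPairSums, List.map_cons, List.filter_cons, List.filter_append]
      split <;> simp [List.foldl_append]

theorem mem_pvPairSums_append_singleton (ys : List Int) (z s : Int) :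
    s ∈ pvPairSums (ys ++ [z]) ↔ s ∈ pvPairSums ys ∨ ∃ y ∈ ys, s = y + z := by
  induction ys with
  | nil => simp [pvPairSums]
  | cons y ys ih =>
    simp only [List.cons_append, pvPairSums, List.mem_append, List.mem_map, ih, List.mem_cons]
    constructor
    · rintro (⟨w, hw | rfl | h0, rfl⟩ | h | ⟨u, hu, rfl⟩)
      · exact Or.inl (Or.inl ⟨w, hw, rfl⟩)
      · exact Or.inr ⟨y, Or.inl rfl, rfl⟩
      · cases h0
      · exact Or.inl (Or.inr h)
      · exact Or.inr ⟨u, Or.inr hu, rfl⟩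
    · rintro ((⟨w, hw, rfl⟩ | h) | ⟨u, rfl | hu, rfl⟩)
      · exact Or.inl ⟨w, Or.inl hw, rfl⟩
      · exact Or.inr (Or.inl h)
      · exact Or.inl ⟨z, Or.inr (Or.inl rfl), rfl⟩
      · exact Or.inr (Or.inr ⟨u, hu, rfl⟩)

theorem pvPairSums_perm {l l' : List Int} (h : l.Perm l') :
    (pvPairSums l).Perm (pvPairSums l') := by
  induction h with
  | nil => exact List.Perm.refl _
  | cons x _h ih => exact ((_h.map _).append ih)
  | swap x y l =>
    have h1 : ((l.map (fun z => y + z)) ++ ((l.map (fun z => x + z)) ++ pvPairSums l)).Perm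
        ((l.map (fun z => x + z)) ++ ((l.map (fun z => y + z)) ++ pvPairSums l)) := by
      rw [← List.append_assoc, ← List.append_assoc]
      exact List.perm_append_comm.append_right _
    simp only [pvPairSums, List.map_cons, List.cons_append]
    rw [Int.add_comm y x]
    exact h1.cons _
  | trans _ _ ih1 ih2 => exact ih1.trans ih2

theorem pvPairSums_short (l : List Int) (h : l.length < 2) : pvPairSums l = [] := by
  match l, h with
  | [], _ => rfl
  | [x], _ => rfl

-- the window of A's two-pointer loop, as a sublist
def pvSeg (L : List Int) (l r : Int) : List Int := (L.drop l.toNat).take ((r - l).toNat + 1)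

theorem pvMono (L : List Int) (hL : L.Pairwise (fun a b => a ≤ b)) (i j : Nat)
    (hj : j < L.length) (hij : i ≤ j) : L[i]'(by omega) ≤ L[j] := by
  rcases Nat.lt_or_ge i j with h | h
  · exact (List.pairwise_iff_getElem.mp hL) i j (by omega) hj h
  · have : i = j := by omega
    subst this; exact le_refl _

-- every element of the window lies between its endpoints
theorem pvSeg_bounds (L : List Int) (hL : L.Pairwise (fun a b => a ≤ b)) (a b k : Nat)
    (hb : b < L.length) (hba : b - a = k + 1) (hab : a < b) :
    ∀ y ∈ (L.drop a).take (k + 2), L[a]'(by omega) ≤ y ∧ y ≤ L[b] := by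
  intro y hy
  rcases List.mem_iff_getElem.mp hy with ⟨i, hi, hval⟩
  have hlen : ((L.drop a).take (k + 2)).length = min (k + 2) (L.length - a) := by
    simp [List.length_take, List.length_drop]
  have hi2 : i < min (k + 2) (L.length - a) := by omega
  have : ((L.drop a).take (k + 2))[i]'hi = L[a + i]'(by omega) := by
    rw [List.getElem_take, List.getElem_drop]
  rw [this] at hval
  rw [← hval]
  exact ⟨pvMono L hL a (a + i) (by omega) (by omega), pvMono L hL (a + i) b hb (by omega)⟩

theorem pvALoop_spec (t : Int) (L : List Int) (hL : L.Pairwise (fun a b => a ≤ b)) :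
    ∀ (k : Nat) (l r diff : Int), 0 ≤ l → l ≤ r → (r : Int) < L.length → (r - l).toNat = k →
    pvALoop t L diff l r =
      match pvLMax ((pvPairSums (pvSeg L l r)).filter (fun s => decide (s ≤ t))) with
      | none => diff
      | some m => min diff (t - m) := by
  intro k
  induction k generalizing t with
  | zero =>
    intro l r diff h0 hlr hr hk
    have hps : pvPairSums (pvSeg L l r) = [] := by
      apply pvPairSums_short
      have : (r - l).toNat + 1 = 1 := by omega
      simp [pvSeg, this, List.length_take]
    rw [pvALoop]
    have : ¬ l < r := by omega
    simp [this, hps, pvLMax]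
  | succ k ih =>
    intro l r diff h0 hlr hr hk
    have hlr' : l < r := by omega
    have hab : l.toNat < r.toNat := by omega
    have hbL : r.toNat < L.length := by omega
    have hba : r.toNat - l.toNat = k + 1 := by omega
    have hgl : PySem.List.pyGetD L l 0 = L[l.toNat]'(by omega) :=
      PySem.List.pyGetD_eq_getElem L 0 h0 (by omega)
    have hgr : PySem.List.pyGetD L r 0 = L[r.toNat] :=
      PySem.List.pyGetD_eq_getElem L 0 (by omega) (by omega)
    have hseg : pvSeg L l r = (L.drop l.toNat).take (k + 2) := by
      unfold pvSeg
      congr 1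
      omega
    have hbounds := pvSeg_bounds L hL l.toNat r.toNat k hbL hba hab
    by_cases hc : L[l.toNat]'(by omega) + L[r.toNat] > t
    · rw [pvALoop]
      rw [dif_pos hlr', hgl, hgr, if_pos hc]
      rw [ih t l (r - 1) diff h0 (by omega) (by omega) (by omega)]
      have hseg' : pvSeg L l (r - 1) = (L.drop l.toNat).take (k + 1) := by
        unfold pvSeg
        congr 1
        omega
      have hsplit : pvSeg L l r = pvSeg L l (r - 1) ++ [L[r.toNat]] := by
        rw [hseg, hseg', List.take_add_one]
        congr 1
        have h1 : k + 1 < (L.drop l.toNat).length := by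
          simp [List.length_drop]; omega
        rw [List.getElem?_eq_getElem h1]
        simp [List.getElem_drop]
        congr 1
        omega
      have hmemiff : ∀ s : Int,
          s ∈ (pvPairSums (pvSeg L l r)).filter (fun s => decide (s ≤ t)) ↔
          s ∈ (pvPairSums (pvSeg L l (r - 1))).filter (fun s => decide (s ≤ t)) := by
        intro s
        simp only [List.mem_filter, decide_eq_true_iff, hsplit,
          mem_pvPairSums_append_singleton]
        constructor
        · rintro ⟨hmem | ⟨y, hy, rfl⟩, hst⟩
          · exact ⟨hmem, hst⟩
          · exfalso
            have hy' : y ∈ pvSeg L l r := by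
              rw [hsplit]; exact List.mem_append_left _ hy
            have := (hbounds y (by rwa [← hseg])).1
            omega
        · rintro ⟨hmem, hst⟩
          exact ⟨Or.inl hmem, hst⟩
      rw [pvLMax_congr _ _ hmemiff]
    · rw [pvALoop]
      rw [dif_pos hlr', hgl, hgr, if_neg hc]
      rw [ih t (l + 1) r (min diff (t - L[l.toNat]'(by omega) - L[r.toNat]))
        (by omega) (by omega) hr (by omega)]
      have hc' : L[l.toNat]'(by omega) + L[r.toNat] ≤ t := by omega
      have hseg2 : pvSeg L (l + 1) r = (L.drop (l.toNat + 1)).take (k + 1) := by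
        unfold pvSeg
        rw [show ((l : Int) + 1).toNat = l.toNat + 1 by omega,
          show (r - (l + 1)).toNat + 1 = k + 1 by omega]
      have hcons : pvSeg L l r = L[l.toNat]'(by omega) :: pvSeg L (l + 1) r := by
        rw [hseg, hseg2, List.drop_eq_getElem_cons (by omega : l.toNat < L.length)]
        rfl
      -- the tail window contains L[r] and everything in it is ≤ L[r]
      have hlast_mem : L[r.toNat] ∈ pvSeg L (l + 1) r := by
        have hlen : k < ((L.drop (l.toNat + 1)).take (k + 1)).length := by
          simp [List.length_take, List.length_drop]; omega
        rw [hseg2]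
        refine List.mem_iff_getElem.mpr ⟨k, hlen, ?_⟩
        rw [List.getElem_take, List.getElem_drop]
        congr 1
        omega
      have htail_le : ∀ y ∈ pvSeg L (l + 1) r, y ≤ L[r.toNat] := by
        intro y hy
        have : y ∈ pvSeg L l r := by rw [hcons]; exact List.mem_cons_of_mem _ hy
        exact (hbounds y (by rwa [← hseg])).2
      -- the map part of the filtered sums survives whole and has max L[l] + L[r]
      have hmap_all : ((pvSeg L (l + 1) r).map (fun y => L[l.toNat]'(by omega) + y)).filter
          (fun s => decide (s ≤ t)) = (pvSeg L (l + 1) r).map (fun y => L[l.toNat]'(by omega) + y) := by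
        apply List.filter_eq_self.mpr
        intro s hs
        rcases List.mem_map.mp hs with ⟨y, hy, rfl⟩
        have := htail_le y hy
        exact decide_eq_true (by omega)
      have hmap_max : pvLMax ((pvSeg L (l + 1) r).map (fun y => L[l.toNat]'(by omega) + y)) =
          some (L[l.toNat]'(by omega) + L[r.toNat]) := by
        apply (pvLMax_eq_some_iff _ _).mpr
        constructor
        · exact List.mem_map.mpr ⟨L[r.toNat], hlast_mem, rfl⟩
        · intro y hy
          rcases List.mem_map.mp hy with ⟨w, hw, rfl⟩
          have := htail_le w hw
          omega
      rw [hcons]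
      show _ = (match pvLMax ((pvPairSums (L[l.toNat]'(by omega) :: pvSeg L (l + 1) r)).filter
          (fun s => decide (s ≤ t))) with
        | none => diff
        | some m => min diff (t - m))
      simp only [pvPairSums, List.filter_append, hmap_all]
      have hfoldapp : ∀ (A B : List Int), pvLMax (A ++ B) =
          match pvLMax B with | none => pvLMax A | some m => pvOmax (pvLMax A) m := by
        intro A B
        unfold pvLMax
        rw [List.foldl_append]
        exact pvFold_omax B _
      rw [hfoldapp, hmap_max]
      cases hF : pvLMax ((pvPairSums (pvSeg L (l + 1) r)).filter (fun s => decide (s ≤ t))) with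
      | none =>
        show min diff (t - L[l.toNat]'(by omega) - L[r.toNat]) =
            min diff (t - (L[l.toNat]'(by omega) + L[r.toNat]))
        rw [Int.sub_sub]
      | some m =>
        simp only [pvOmax]
        show min (min diff (t - L[l.toNat]'(by omega) - L[r.toNat])) (t - m) =
            min diff (t - max (L[l.toNat]'(by omega) + L[r.toNat]) m)
        rw [Int.sub_sub, min_assoc]
        rcases le_total (L[l.toNat]'(by omega) + L[r.toNat]) m with h | h
        · rw [max_eq_right h,
            min_eq_right (by omega : t - m ≤ t - (L[l.toNat]'(by omega) + L[r.toNat]))]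
        · rw [max_eq_left h,
            min_eq_left (by omega : t - (L[l.toNat]'(by omega) + L[r.toNat]) ≤ t - m)]

-- characterization of port A: sort, then the two-pointer result
theorem pvA_char (t : Int) (array : List Int) (h2 : 2 ≤ array.length) :
    closestTargetValue t array =
      match pvLMax ((pvPairSums (PySem.List.sorted array (fun x => x) false)).filter
          (fun s => decide (s ≤ t))) with
      | none => -1
      | some m => if 2147483647 ≤ t - m then -1 else m := by
  have hL : (PySem.List.sorted array (fun x => x) false).length = array.length :=
    PySem.List.length_sorted array (fun x => x) false
  have hpair : (PySem.List.sorted array (fun x => x) false).Pairwise (fun a b => a ≤ b) :=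
    PySem.List.sorted_pairwise array (fun x => x)
  have hseg : pvSeg (PySem.List.sorted array (fun x => x) false) 0 ((array.length : Int) - 1) =
      PySem.List.sorted array (fun x => x) false := by
    unfold pvSeg
    rw [show ((0 : Int)).toNat = 0 by rfl, List.drop_zero,
      show ((array.length : Int) - 1 - 0).toNat + 1 =
        (PySem.List.sorted array (fun x => x) false).length by omega]
    exact List.take_length
  have hspec := pvALoop_spec t (PySem.List.sorted array (fun x => x) false) hpair
    (((array.length : Int) - 1 - 0).toNat) 0 ((array.length : Int) - 1) 2147483647
    (by omega) (by omega) (by omega) rfl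
  rw [hseg] at hspec
  show (if (array.length : Int) < 2 then (-1 : Int)
    else
      if pvALoop t (PySem.List.sorted array (fun x => x) false) 2147483647 0
          ((array.length : Int) - 1) = 2147483647 then -1
      else t - pvALoop t (PySem.List.sorted array (fun x => x) false) 2147483647 0
          ((array.length : Int) - 1)) = _
  rw [if_neg (by omega : ¬ (array.length : Int) < 2), hspec]
  cases hV : pvLMax ((pvPairSums (PySem.List.sorted array (fun x => x) false)).filter
      (fun s => decide (s ≤ t))) with
  | none => simp
  | some m =>
    show (if min 2147483647 (t - m) = 2147483647 then (-1 : Int)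
      else t - min 2147483647 (t - m)) = if 2147483647 ≤ t - m then -1 else m
    by_cases hge : (2147483647 : Int) ≤ t - m
    · rw [min_eq_left (by omega : (2147483647 : Int) ≤ t - m)]
      simp [hge]
    · rw [min_eq_right (by omega : t - m ≤ (2147483647 : Int))]
      rw [if_neg (by omega : ¬ (t - m) = 2147483647), if_neg hge]
      omega

-- characterization of port B: the running max over admissible pair sums of the sorted list
theorem pvB_char (t : Int) (array : List Int) :
    closestTargetValue_alt t array =
      match pvLMax ((pvPairSums (PySem.List.sorted array (fun x => x) false)).filter
          (fun s => decide (s ≤ t))) with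
      | none => -1
      | some m => m := by
  show (match pvBLoop t none (PySem.List.sorted array (fun x => x) false) with
    | some m => m
    | none => (-1 : Int)) = _
  rw [pvBLoop_eq]
  cases hV : pvLMax ((pvPairSums (PySem.List.sorted array (fun x => x) false)).filter
      (fun s => decide (s ≤ t))) with
  | none => rw [show List.foldl pvOmax none ((pvPairSums (PySem.List.sorted array (fun x => x)
      false)).filter (fun s => decide (s ≤ t))) = pvLMax _ from rfl, hV]
  | some m => rw [show List.foldl pvOmax none ((pvPairSums (PySem.List.sorted array (fun x => x)
      false)).filter (fun s => decide (s ≤ t))) = pvLMax _ from rfl, hV]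

-- ===== VERDICT (by name: the statement is the Claim_ definition above) =====
theorem closestTargetValue_spec : Claim_unchanged_closestTargetValue := by
  intro t array _dom
  intro hnD
  have hperm : (PySem.List.sorted array (fun x => x) false).Perm array :=
    PySem.List.sorted_perm array (fun x => x) false
  have hmemPS : ∀ s : Int, s ∈ pvPairSums (PySem.List.sorted array (fun x => x) false) ↔
      s ∈ pvPairSums array := fun s => (pvPairSums_perm hperm).mem_iff
  by_cases h2 : 2 ≤ array.length
  · rw [pvA_char t array h2, pvB_char]
    cases hV : pvLMax ((pvPairSums (PySem.List.sorted array (fun x => x) false)).filter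
        (fun s => decide (s ≤ t))) with
    | none => rfl
    | some m =>
      show (if (2147483647 : Int) ≤ t - m then (-1 : Int) else m) = m
      by_cases hge : (2147483647 : Int) ≤ t - m
      · rw [if_pos hge]
        rcases (pvLMax_eq_some_iff _ _).mp hV with ⟨hmF, hub⟩
        rcases List.mem_filter.mp hmF with ⟨hmPS, hmt'⟩
        have hmt : m ≤ t := of_decide_eq_true hmt'
        by_contra hne
        refine hnD ⟨m, (hmemPS m).mp hmPS, by omega, by omega, ?_⟩
        intro s hs hst
        exact hub s (List.mem_filter.mpr ⟨(hmemPS s).mpr hs, decide_eq_true hst⟩)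
      · rw [if_neg hge]
  · -- fewer than two elements: both return -1
    have hA : closestTargetValue t array = -1 := by
      show (if (array.length : Int) < 2 then (-1 : Int) else _) = -1
      rw [if_pos (by omega : (array.length : Int) < 2)]
    have hPSnil : pvPairSums (PySem.List.sorted array (fun x => x) false) = [] := by
      apply pvPairSums_short
      rw [PySem.List.length_sorted]
      omega
    rw [hA, pvB_char, hPSnil]
    rfl

theorem closestTargetValue_changed : Claim_changed_closestTargetValue := by
  unfold Claim_changed_closestTargetValue
  refine ⟨by decide, by decide, ?_, by decide, by decide⟩
  have hs : PySem.List.sorted [(-1073741824 : Int), -1073741823] (fun x => x) false =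
      [-1073741824, -1073741823] := by decide
  have g0 : PySem.List.pyGetD [(-1073741824 : Int), -1073741823] 0 0 = -1073741824 := by decide
  have g1 : PySem.List.pyGetD [(-1073741824 : Int), -1073741823] 1 0 = -1073741823 := by decide
  have hloop : pvALoop 0 [(-1073741824 : Int), -1073741823] 2147483647 0 1 = 2147483647 := by
    rw [pvALoop, dif_pos (by norm_num : (0 : Int) < 1), g0, g1,
      if_neg (by norm_num : ¬ (-1073741824 : Int) + -1073741823 > 0)]
    rw [pvALoop, dif_neg (by norm_num : ¬ (0 : Int) + 1 < 1)]
    norm_num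
  show closestTargetValue 0 [-1073741824, -1073741823] = -1
  show (if ((2 : Nat) : Int) < 2 then (-1 : Int)
    else
      if pvALoop 0 (PySem.List.sorted [(-1073741824 : Int), -1073741823] (fun x => x) false)
          2147483647 0 (((2 : Nat) : Int) - 1) = 2147483647 then -1
      else 0 - pvALoop 0 (PySem.List.sorted [(-1073741824 : Int), -1073741823] (fun x => x) false)
          2147483647 0 (((2 : Nat) : Int) - 1)) = -1
  rw [if_neg (by norm_num), hs]
  norm_num [hloop]

theorem closestTargetValue_tight : Claim_exact_closestTargetValue := by
  intro t array _dom hD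
  rcases hD with ⟨m0, hm0P, hm0small, hm0ne, hm0ub⟩
  have hperm : (PySem.List.sorted array (fun x => x) false).Perm array :=
    PySem.List.sorted_perm array (fun x => x) false
  have hmemPS : ∀ s : Int, s ∈ pvPairSums (PySem.List.sorted array (fun x => x) false) ↔
      s ∈ pvPairSums array := fun s => (pvPairSums_perm hperm).mem_iff
  have h2 : 2 ≤ array.length := by
    by_contra h
    rw [pvPairSums_short array (by omega)] at hm0P
    exact List.not_mem_nil hm0P
  have hm0F : m0 ∈ (pvPairSums (PySem.List.sorted array (fun x => x) false)).filter
      (fun s => decide (s ≤ t)) :=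
    List.mem_filter.mpr ⟨(hmemPS m0).mpr hm0P, decide_eq_true (by omega)⟩
  rw [pvA_char t array h2, pvB_char]
  cases hV : pvLMax ((pvPairSums (PySem.List.sorted array (fun x => x) false)).filter
      (fun s => decide (s ≤ t))) with
  | none =>
    exfalso
    rw [(pvLMax_none_iff _).mp hV] at hm0F
    exact List.not_mem_nil hm0F
  | some m =>
    rcases (pvLMax_eq_some_iff _ _).mp hV with ⟨hmF, hub⟩
    rcases List.mem_filter.mp hmF with ⟨hmPS, hmt'⟩
    have hmt : m ≤ t := of_decide_eq_true hmt'
    have hle1 : m0 ≤ m := hub m0 hm0F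
    have hle2 : m ≤ m0 := hm0ub m ((hmemPS m).mp hmPS) hmt
    show (if (2147483647 : Int) ≤ t - m then (-1 : Int) else m) ≠ m
    rw [if_pos (by omega : (2147483647 : Int) ≤ t - m)]
    omega
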